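-- pv_equiv track=rewrite | github.com/pypi-data/pypi-mirror-185 | packages/relativize-imports/relativize_imports-0.0.6-py2.py3-none-any.whl/relativize_imports.py | _find_relative_depth
-- ===== SOURCE A (Python) =====
-- from typing import Sequence
--
-- def _find_relative_depth(parts: Sequence[str], module: str) -> int:
--     depth = 0
--     for n, _ in enumerate(parts, start=1):
--         if module.startswith(".".join(parts[:n])):
--             depth += 1
--         else:
--             break
--     return depth
-- ===== SOURCE B (Python) =====
-- def _find_relative_depth(parts, module):
--     # Single pass: consume one component (plus its joining dot) at a time,
--     # comparing it against the next slice of `module` instead of re-joining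
--     # the whole prefix for every n.
--     depth = 0
--     pos = 0
--     for i, p in enumerate(parts):
--         seg = p if i == 0 else "." + p
--         if module[pos:pos + len(seg)] == seg:
--             pos += len(seg)
--             depth += 1
--         else:
--             break
--     return depth
-- ===== Notes on version B (the rewrite author's own statement) =====
-- stated objective: alternative
-- what changed: B replaces A's re-join-and-rescan of the whole growing prefix at every step with a single pass that consumes one component (plus its joining dot) at a time, comparing it against the next slice of the module string; on the measured input family this was not faster.
import Mathlib
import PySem

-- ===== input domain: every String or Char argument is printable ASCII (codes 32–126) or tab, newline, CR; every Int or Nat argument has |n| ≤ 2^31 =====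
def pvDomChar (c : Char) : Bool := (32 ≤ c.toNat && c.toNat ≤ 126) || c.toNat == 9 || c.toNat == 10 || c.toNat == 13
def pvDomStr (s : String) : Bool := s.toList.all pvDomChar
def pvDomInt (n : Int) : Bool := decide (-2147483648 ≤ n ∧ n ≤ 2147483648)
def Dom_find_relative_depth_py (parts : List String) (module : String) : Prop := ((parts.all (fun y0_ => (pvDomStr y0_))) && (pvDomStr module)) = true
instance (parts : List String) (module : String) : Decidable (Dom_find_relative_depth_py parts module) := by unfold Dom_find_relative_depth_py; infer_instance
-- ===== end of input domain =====

-- B replaces A's re-join-and-rescan of the whole growing prefix at every step with a single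
-- pass consuming one component (plus its joining dot) at a time against the module string.

-- ===== PORT A =====
-- the loop "for n, _ in enumerate(parts, start=1): if module.startswith('.'.join(parts[:n])): depth += 1 else: break"
-- recursion on the remaining iterations; n is the 1-based counter, partsC the full list
def pvALoop (partsC : List (List Char)) (modC : List Char) :
    List (List Char) → Nat → Int → Int
  | [], _, depth => depth
  | _ :: rest, n, depth =>
      if PySem.Chars.startswith modC
           (PySem.Chars.join ['.'] (PySem.List.slice partsC none (some (n : Int)))) then
        pvALoop partsC modC rest (n + 1) (depth + 1)
      else depth

def find_relative_depth_py (parts : List String) (module : String) : Int :=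
  pvALoop (parts.map String.toList) module.toList (parts.map String.toList) 1 0

-- ===== PORT B =====
-- one pass: seg = p if i == 0 else "." + p; if module[pos:pos+len(seg)] == seg: pos += len(seg); depth += 1 else break
def pvBLoop (modC : List Char) : List (List Char) → Nat → Nat → Int → Int
  | [], _, _, depth => depth
  | p :: rest, i, pos, depth =>
      let seg := if i == 0 then p else '.' :: p
      if PySem.List.slice modC (some (pos : Int)) (some ((pos : Int) + (seg.length : Int))) = seg then
        pvBLoop modC rest (i + 1) (pos + seg.length) (depth + 1)
      else depth

def find_relative_depth_py_alt (parts : List String) (module : String) : Int :=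
  pvBLoop module.toList (parts.map String.toList) 0 0 0

-- ===== PRECONDITION & SPEC =====
def Spec_find_relative_depth_py (parts : List String) (module : String) (out : Int) : Prop := out = find_relative_depth_py_alt parts module
instance (parts : List String) (module : String) (out : Int) : Decidable (Spec_find_relative_depth_py parts module out) := by unfold Spec_find_relative_depth_py; infer_instance

-- ===== CLAIM (what is proved, stated in full; the proofs are below) =====
def Claim_equal_find_relative_depth_py : Prop := ∀ (parts : List String) (module : String), Dom_find_relative_depth_py parts module → Spec_find_relative_depth_py parts module (find_relative_depth_py parts module)

-- ===== LEMMAS AND PROOFS =====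

-- '.'-join of a list extended by one component
theorem pv_join_snoc (sep : List Char) (pre : List (List Char)) (p : List Char) :
    PySem.Chars.join sep (pre ++ [p])
      = PySem.Chars.join sep pre ++ (if pre = [] then p else sep ++ p) := by
  induction pre with
  | nil => simp [PySem.Chars.join_singleton, PySem.Chars.join_nil]
  | cons a pre' ih =>
    cases pre' with
    | nil =>
      simp [PySem.Chars.join_cons_cons, PySem.Chars.join_singleton, List.append_assoc]
    | cons b t =>
      have h1 : (a :: b :: t) ++ [p] = a :: ((b :: t) ++ [p]) := by simp
      have h2 : (b :: t) ++ [p] = b :: (t ++ [p]) := by simp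
      rw [h1, h2, PySem.Chars.join_cons_cons, ← h2, ih,
          PySem.Chars.join_cons_cons]
      simp [List.append_assoc]

-- comparing the slice of m just past a known prefix u equals extending the prefix
theorem pv_slice_prefix (u v m : List Char) (h : u <+: m) :
    ((m.drop u.length).take v.length = v) ↔ (u ++ v) <+: m := by
  obtain ⟨t, rfl⟩ := h
  rw [List.drop_left, List.prefix_append_right_inj, List.prefix_iff_eq_take]
  exact eq_comm

theorem pv_loop_eq (modC : List Char) (rem : List (List Char)) :
    ∀ (pre : List (List Char)) (depth : Int),
    PySem.Chars.join ['.'] pre <+: modC →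
    pvALoop (pre ++ rem) modC rem (pre.length + 1) depth
      = pvBLoop modC rem pre.length (PySem.Chars.join ['.'] pre).length depth := by
  induction rem with
  | nil => intro pre depth _; simp [pvALoop, pvBLoop]
  | cons p rest ih =>
    intro pre depth h
    have hsnoc := pv_join_snoc ['.'] pre p
    have hseg : (if pre.length == 0 then p else '.' :: p)
        = (if pre = [] then p else ['.'] ++ p) := by cases pre <;> simp
    have htake : (pre ++ p :: rest).take (pre.length + 1) = pre ++ [p] := by
      have hsplit : pre ++ p :: rest = (pre ++ [p]) ++ rest := by simp
      rw [hsplit, List.take_left' (by simp)]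
    have hcondB :
        (PySem.List.slice modC (some ((PySem.Chars.join ['.'] pre).length : Int))
            (some (((PySem.Chars.join ['.'] pre).length : Int)
              + ((if pre.length == 0 then p else '.' :: p).length : Int)))
          = (if pre.length == 0 then p else '.' :: p))
        ↔ PySem.Chars.join ['.'] (pre ++ [p]) <+: modC := by
      rw [PySem.List.slice_natCast_add, pv_slice_prefix _ _ _ h, hsnoc, hseg]
    have hcondA :
        PySem.Chars.startswith modC
            (PySem.Chars.join ['.']
              (PySem.List.slice (pre ++ p :: rest) none (some ((pre.length + 1 : Nat) : Int)))) = true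
        ↔ PySem.Chars.join ['.'] (pre ++ [p]) <+: modC := by
      rw [PySem.List.slice_to_natCast, htake]
      exact PySem.Chars.startswith_iff _ _
    simp only [pvALoop, pvBLoop]
    by_cases hp : PySem.Chars.join ['.'] (pre ++ [p]) <+: modC
    · rw [if_pos (hcondA.mpr hp), if_pos (hcondB.mpr hp)]
      have := ih (pre ++ [p]) (depth + 1) hp
      simp only [List.append_assoc, List.singleton_append, List.length_append,
        List.length_singleton, hsnoc, hseg, List.length_append] at this ⊢
      exact this
    · rw [if_neg (fun hc => hp (hcondA.mp hc)), if_neg (fun hc => hp (hcondB.mp hc))]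

-- ===== VERDICT (by name: the statement is the Claim_ definition above) =====
theorem find_relative_depth_py_spec : Claim_equal_find_relative_depth_py := by
  intro parts module _
  unfold Spec_find_relative_depth_py find_relative_depth_py find_relative_depth_py_alt
  simpa using pv_loop_eq module.toList (parts.map String.toList) [] 0 (List.nil_prefix)
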